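-- pv_equiv track=rewrite | github.com/QuellaMC/PuzzleSolver | solver.py | solve
-- ===== SOURCE A (Python) =====
-- def solve(placements, board_noholes):
--     piece_order = sorted(placements.keys(), key=lambda pid: len(placements[pid]))
--     used = set()
--     solution = {}
--
--     def backtrack(idx):
--         if idx >= len(piece_order):
--             return used == board_noholes
--         pid = piece_order[idx]
--         for shape in placements[pid]:
--             if shape & used:
--                 continue
--             prev_used = set(used)
--             used.update(shape)
--             solution[pid] = shape
--             if backtrack(idx+1):
--                 return True
--             used.clear()
--             used.update(prev_used)
--             del solution[pid]
--         return False
--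
--     return solution if backtrack(0) else None
-- ===== SOURCE B (Python) =====
-- def solve(placements, board_noholes):
--     # Staged breadth-first expansion: instead of a recursive backtracker, build the whole
--     # list of non-overlapping partial placements level by level (one pass per piece, in the
--     # same sorted piece order and shape order), then return the first complete state.
--     piece_order = sorted(placements, key=lambda pid: len(placements[pid]))
--     states = [(frozenset(), {})]
--     for pid in piece_order:
--         states = [(used | shape, {**sol, pid: shape})
--                   for (used, sol) in states
--                   for shape in placements[pid]
--                   if shape.isdisjoint(used)]
--     for used, sol in states:
--         if used == board_noholes:
--             return sol
--     return None
-- ===== Notes on version B (the rewrite author's own statement) =====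
-- stated objective: alternative
-- what changed: A's depth-first recursive backtracker over shared mutable used/solution state (with explicit undo) is replaced by a staged breadth-first expansion: an iterative loop builds, level by level, the list of all non-overlapping partial placements in the same lexicographic order, then a final linear scan returns the first state covering the board.
import Mathlib
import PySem

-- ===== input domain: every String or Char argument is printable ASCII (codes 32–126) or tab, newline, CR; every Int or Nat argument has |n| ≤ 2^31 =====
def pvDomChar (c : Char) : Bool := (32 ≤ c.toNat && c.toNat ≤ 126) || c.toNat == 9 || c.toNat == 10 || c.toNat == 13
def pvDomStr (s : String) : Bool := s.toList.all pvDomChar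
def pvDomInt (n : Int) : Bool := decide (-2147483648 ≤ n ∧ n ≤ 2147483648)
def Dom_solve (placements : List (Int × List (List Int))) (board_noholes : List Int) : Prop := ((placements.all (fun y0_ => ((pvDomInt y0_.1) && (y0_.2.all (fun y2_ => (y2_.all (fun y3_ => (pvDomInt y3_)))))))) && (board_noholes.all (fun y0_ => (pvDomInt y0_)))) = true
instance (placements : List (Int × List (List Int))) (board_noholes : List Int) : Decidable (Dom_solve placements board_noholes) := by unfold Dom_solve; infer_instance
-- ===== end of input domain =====

-- B replaces A's depth-first recursive backtracker over shared mutable state by a staged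
-- breadth-first expansion (one pass per piece) followed by a linear scan for the first
-- complete state (objective: alternative; same search order, hence the same answer).


-- ===== PORT A =====
-- `backtrack(idx)` with its shared mutable `used`/`solution` becomes a pure recursion carrying
-- (used, solution) — the undo (`used.clear(); used.update(prev_used); del solution[pid]`) is
-- exactly retrying with the unchanged state.  The early-returning `for shape in placements[pid]`
-- loop is the foldr over the shape list with `next` as the continuation for `continue`/failure.
def pvBtA (d : PySem.Dict Int (List (List Int))) (board : List Int) :
    List Int → PySem.Set Int → PySem.Dict Int (List Int) → Option (PySem.Dict Int (List Int))
  | [], used, sol => if PySem.Set.equal used board then some sol else none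
  | pid :: rest, used, sol =>
    (d.getD pid []).foldr
      (fun s next =>
        let sh := PySem.Set.ofList s
        if PySem.Set.inter sh used ≠ [] then next
        else
          match pvBtA d board rest (PySem.Set.update used sh) (sol.insert pid sh) with
          | some r => some r
          | none => next)
      none

def solve (placements : List (Int × List (List Int))) (board_noholes : List Int) :
    Option (List (Int × List Int)) :=
  let d := PySem.Dict.ofList placements
  let piece_order := PySem.List.sorted d.keys (fun pid => (d.getD pid []).length) false
  match pvBtA d board_noholes piece_order PySem.Set.empty PySem.Dict.empty with
  | some sol => some sol.items
  | none => none

-- ===== PORT B =====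
-- One level of Source B's `for pid in piece_order: states = [...]` comprehension.
def pvStepB (d : PySem.Dict Int (List (List Int)))
    (states : List (PySem.Set Int × PySem.Dict Int (List Int))) (pid : Int) :
    List (PySem.Set Int × PySem.Dict Int (List Int)) :=
  states.flatMap (fun st =>
    ((d.getD pid []).filter (fun s => PySem.Set.isdisjoint (PySem.Set.ofList s) st.1)).map
      (fun s => (PySem.Set.union st.1 (PySem.Set.ofList s), st.2.insert pid (PySem.Set.ofList s))))

-- Source B's final `for used, sol in states: if used == board_noholes: return sol` scan.
def pvFirstFullB (board : List Int) :
    List (PySem.Set Int × PySem.Dict Int (List Int)) → Option (PySem.Dict Int (List Int))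
  | [] => none
  | st :: rest => if PySem.Set.equal st.1 board then some st.2 else pvFirstFullB board rest

def solve_alt (placements : List (Int × List (List Int))) (board_noholes : List Int) :
    Option (List (Int × List Int)) :=
  let d := PySem.Dict.ofList placements
  let piece_order := PySem.List.sorted d.keys (fun pid => (d.getD pid []).length) false
  let states := piece_order.foldl (pvStepB d) [(PySem.Set.empty, PySem.Dict.empty)]
  (pvFirstFullB board_noholes states).map PySem.Dict.items

-- ===== PRECONDITION & SPEC =====
def Spec_solve (placements : List (Int × List (List Int))) (board_noholes : List Int) (out : Option (List (Int × List Int))) : Prop := out = solve_alt placements board_noholes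
instance (placements : List (Int × List (List Int))) (board_noholes : List Int) (out : Option (List (Int × List Int))) : Decidable (Spec_solve placements board_noholes out) := by unfold Spec_solve; infer_instance

-- ===== CLAIM =====
def Claim_equal_solve : Prop := ∀ (placements : List (Int × List (List Int))) (board_noholes : List Int), Dom_solve placements board_noholes → Spec_solve placements board_noholes (solve placements board_noholes)

-- ===== LEMMAS AND PROOFS =====

-- Proof-only intermediate: the DFS stream of complete solutions extending a state, in search order.
def pvGen (d : PySem.Dict Int (List (List Int))) (board : List Int) :
    List Int → PySem.Set Int → PySem.Dict Int (List Int) → List (PySem.Dict Int (List Int))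
  | [], used, sol => if PySem.Set.equal used board then [sol] else []
  | pid :: rest, used, sol =>
    ((d.getD pid []).filter (fun s => PySem.Set.isdisjoint (PySem.Set.ofList s) used)).flatMap
      (fun s =>
        pvGen d board rest (PySem.Set.union used (PySem.Set.ofList s))
          (sol.insert pid (PySem.Set.ofList s)))

-- A's overlap test `shape & used` is empty exactly when B's `shape.isdisjoint(used)` holds.
theorem pv_inter_nil_iff_isdisjoint (s t : List Int) :
    PySem.Set.inter s t = [] ↔ PySem.Set.isdisjoint s t = true := by
  simp [PySem.Set.inter, PySem.Set.isdisjoint, List.filter_eq_nil_iff]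

-- A's backtracker returns the head of the DFS solution stream, for every state.
theorem pvBtA_eq_head (d : PySem.Dict Int (List (List Int))) (board : List Int) :
    ∀ (order : List Int) (used : PySem.Set Int) (sol : PySem.Dict Int (List Int)),
      pvBtA d board order used sol = (pvGen d board order used sol).head? := by
  intro order
  induction order with
  | nil =>
    intro used sol
    simp only [pvBtA, pvGen]
    split <;> rfl
  | cons pid rest ih =>
    intro used sol
    simp only [pvBtA, pvGen, PySem.Set.union]
    induction (d.getD pid []) with
    | nil => rfl
    | cons s ss ihs =>
      simp only [List.foldr_cons, List.filter_cons]
      by_cases hdis : PySem.Set.inter (PySem.Set.ofList s) used = []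
      · have hd : PySem.Set.isdisjoint (PySem.Set.ofList s) used = true :=
          (pv_inter_nil_iff_isdisjoint _ _).mp hdis
        simp only [hdis, hd, if_pos, ne_eq, not_true_eq_false, if_false,
          List.flatMap_cons, List.head?_append]
        rw [ih]
        cases h : (pvGen d board rest (PySem.Set.update used (PySem.Set.ofList s))
            (sol.insert pid (PySem.Set.ofList s))).head? with
        | some r => simp
        | none => simpa using ihs
      · have hd : PySem.Set.isdisjoint (PySem.Set.ofList s) used = false := by
          rcases h' : PySem.Set.isdisjoint (PySem.Set.ofList s) used with _ | _
          · rfl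
          · exact absurd ((pv_inter_nil_iff_isdisjoint _ _).mpr h') hdis
        simp only [hdis, hd, ne_eq, Bool.false_eq_true, if_false]
        exact ihs

-- B's final scan is the head of the completeness-filtered stream.
theorem pvFirstFullB_eq_head (board : List Int) :
    ∀ (sts : List (PySem.Set Int × PySem.Dict Int (List Int))),
      pvFirstFullB board sts
        = (sts.flatMap (fun st => if PySem.Set.equal st.1 board then [st.2] else [])).head? := by
  intro sts
  induction sts with
  | nil => rfl
  | cons st rest ih =>
    simp only [pvFirstFullB, List.flatMap_cons]
    by_cases h : PySem.Set.equal st.1 board = true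
    · simp [h]
    · simp only [h, Bool.false_eq_true, if_false, List.nil_append]
      exact ih

-- B's staged expansion, scanned for the first complete state, is the head of the same stream.
theorem pvFoldB_eq_gen (d : PySem.Dict Int (List (List Int))) (board : List Int) :
    ∀ (order : List Int) (sts : List (PySem.Set Int × PySem.Dict Int (List Int))),
      pvFirstFullB board (order.foldl (pvStepB d) sts)
        = (sts.flatMap (fun st => pvGen d board order st.1 st.2)).head? := by
  intro order
  induction order with
  | nil =>
    intro sts
    simpa only [List.foldl_nil] using pvFirstFullB_eq_head board sts
  | cons pid rest ih =>
    intro sts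
    simp only [List.foldl_cons]
    rw [ih]
    congr 1
    simp only [pvStepB, pvGen, List.flatMap_assoc, List.flatMap_map]

-- ===== VERDICT =====
theorem solve_spec : Claim_equal_solve := by
  intro placements board_noholes _
  unfold Spec_solve
  simp only [solve, solve_alt]
  rw [pvBtA_eq_head, pvFoldB_eq_gen]
  simp only [List.flatMap_cons, List.flatMap_nil, List.append_nil]
  cases (pvGen (PySem.Dict.ofList placements) board_noholes
      (PySem.List.sorted (PySem.Dict.ofList placements).keys
        (fun pid => ((PySem.Dict.ofList placements).getD pid []).length) false)
      PySem.Set.empty PySem.Dict.empty).head? <;> rfl
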